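-- pv_equiv track=rewrite | github.com/QD25565/mcp-ai-foundation | teambook_presence.py | _derive_operation_category
-- ===== SOURCE A (Python) =====
-- from typing import Dict, List, Optional, Tuple, Any
--
-- def _normalize_operation_name(operation: Optional[str]) -> Optional[str]:
--     if not operation:
--         return None
--     return str(operation).strip().lower()[:50]
--
-- def _derive_operation_category(operation: Optional[str], override: Optional[str]) -> str:
--     if override:
--         candidate = str(override).strip().lower()
--         if candidate in VALID_OPERATION_CATEGORIES:
--             return candidate
--
--     op = _normalize_operation_name(operation) or ""
--
--     if any(op.startswith(prefix) for prefix in ["claim", "queue", "lock", "release", "assign"]):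
--         return "coordination"
--     if any(op.startswith(prefix) for prefix in ["write", "read", "notebook", "memory", "note"]):
--         return "memory"
--     if any(op.startswith(prefix) for prefix in ["broadcast", "message", "event", "watch"]):
--         return "messaging"
--     if any(op.startswith(prefix) for prefix in ["store", "vault", "persist", "edge", "vector"]):
--         return "storage"
--     if any(op.startswith(prefix) for prefix in ["federation", "bridge", "sync"]):
--         return "federation"
--     if any(op.startswith(prefix) for prefix in ["observe", "monitor", "snapshot"]):
--         return "observability"
--
--     return DEFAULT_OPERATION_CATEGORY
--
-- VALID_OPERATION_CATEGORIES = {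
--     "general",
--     "coordination",
--     "memory",
--     "messaging",
--     "storage",
--     "federation",
--     "observability",
-- }
--
-- DEFAULT_OPERATION_CATEGORY = "general"
-- ===== SOURCE B (Python) =====
-- from typing import Optional
--
-- VALID_OPERATION_CATEGORIES = {
--     "general", "coordination", "memory", "messaging",
--     "storage", "federation", "observability",
-- }
-- DEFAULT_OPERATION_CATEGORY = "general"
--
-- # one flat hash table prefix -> category; looked up by slicing op at each
-- # possible prefix length instead of scanning prefix lists with startswith
-- PREFIX_CATEGORY = {
--     "claim": "coordination", "queue": "coordination", "lock": "coordination",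
--     "release": "coordination", "assign": "coordination",
--     "write": "memory", "read": "memory", "notebook": "memory",
--     "memory": "memory", "note": "memory",
--     "broadcast": "messaging", "message": "messaging", "event": "messaging",
--     "watch": "messaging",
--     "store": "storage", "vault": "storage", "persist": "storage",
--     "edge": "storage", "vector": "storage",
--     "federation": "federation", "bridge": "federation", "sync": "federation",
--     "observe": "observability", "monitor": "observability",
--     "snapshot": "observability",
-- }
-- _PREFIX_LENGTHS = (4, 5, 6, 7, 8, 9, 10)
--
-- def _normalize_operation_name(operation: Optional[str]) -> Optional[str]:
--     if not operation:
--         return None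
--     return str(operation).strip().lower()[:50]
--
-- def _derive_operation_category(operation: Optional[str], override: Optional[str]) -> str:
--     if override:
--         candidate = str(override).strip().lower()
--         if candidate in VALID_OPERATION_CATEGORIES:
--             return candidate
--     op = _normalize_operation_name(operation) or ""
--     for k in _PREFIX_LENGTHS:
--         category = PREFIX_CATEGORY.get(op[:k])
--         if category is not None:
--             return category
--     return DEFAULT_OPERATION_CATEGORY
-- ===== Notes on version B (the rewrite author's own statement) =====
-- stated objective: alternative
-- what changed: Replaces the six if-blocks of any(op.startswith(prefix)...) scans with a single flat prefix->category hash table looked up by slicing op at each of the seven possible prefix lengths.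
import Mathlib
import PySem

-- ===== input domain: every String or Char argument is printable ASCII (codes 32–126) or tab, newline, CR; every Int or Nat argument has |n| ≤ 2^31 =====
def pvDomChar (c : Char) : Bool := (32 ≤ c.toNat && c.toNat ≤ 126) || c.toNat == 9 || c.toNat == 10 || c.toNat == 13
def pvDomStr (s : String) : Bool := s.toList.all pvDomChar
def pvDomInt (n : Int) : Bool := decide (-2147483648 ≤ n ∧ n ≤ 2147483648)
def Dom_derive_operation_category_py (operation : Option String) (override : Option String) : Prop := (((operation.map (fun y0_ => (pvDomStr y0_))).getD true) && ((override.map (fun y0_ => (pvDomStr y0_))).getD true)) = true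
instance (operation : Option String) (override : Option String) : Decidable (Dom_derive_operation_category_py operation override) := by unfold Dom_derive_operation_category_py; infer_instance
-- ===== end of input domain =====

-- B replaces A's six any(op.startswith(...)) if-blocks with one flat prefix->category
-- table looked up by slicing op at each possible prefix length (alternative decomposition).

-- ===== PORT A =====
def pvValidCategories : PySem.Set String :=
  PySem.Set.ofList ["general", "coordination", "memory", "messaging", "storage", "federation", "observability"]

-- _normalize_operation_name (shared helper of both Pythons)
def pvNormalize (operation : Option String) : Option String :=
  match operation with
  | none => none
  | some s =>
      if s == "" then none
      else some (PySem.Str.slice (PySem.Str.lower (PySem.Str.strip s)) none (some 50))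

-- the six if-blocks of A
def pvCategorizeA (op : String) : String :=
  if ["claim", "queue", "lock", "release", "assign"].any (fun p => PySem.Str.startswith op p) then "coordination"
  else if ["write", "read", "notebook", "memory", "note"].any (fun p => PySem.Str.startswith op p) then "memory"
  else if ["broadcast", "message", "event", "watch"].any (fun p => PySem.Str.startswith op p) then "messaging"
  else if ["store", "vault", "persist", "edge", "vector"].any (fun p => PySem.Str.startswith op p) then "storage"
  else if ["federation", "bridge", "sync"].any (fun p => PySem.Str.startswith op p) then "federation"
  else if ["observe", "monitor", "snapshot"].any (fun p => PySem.Str.startswith op p) then "observability"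
  else "general"

def derive_operation_category_py (operation : Option String) (override : Option String) : String :=
  let ov := override.getD ""
  if ov ≠ "" then
    let candidate := PySem.Str.lower (PySem.Str.strip ov)
    if PySem.Set.contains pvValidCategories candidate then candidate
    else pvCategorizeA ((pvNormalize operation).getD "")
  else pvCategorizeA ((pvNormalize operation).getD "")

-- ===== PORT B =====
-- PREFIX_CATEGORY of Source B
def pvTable : List (String × String) :=
  [("claim", "coordination"), ("queue", "coordination"), ("lock", "coordination"),
   ("release", "coordination"), ("assign", "coordination"),
   ("write", "memory"), ("read", "memory"), ("notebook", "memory"),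
   ("memory", "memory"), ("note", "memory"),
   ("broadcast", "messaging"), ("message", "messaging"), ("event", "messaging"),
   ("watch", "messaging"),
   ("store", "storage"), ("vault", "storage"), ("persist", "storage"),
   ("edge", "storage"), ("vector", "storage"),
   ("federation", "federation"), ("bridge", "federation"), ("sync", "federation"),
   ("observe", "observability"), ("monitor", "observability"),
   ("snapshot", "observability")]

def pvPM : PySem.Dict String String := PySem.Dict.ofList pvTable

def pvLengths : List Int := [4, 5, 6, 7, 8, 9, 10]

-- 'for k in _PREFIX_LENGTHS: category = PREFIX_CATEGORY.get(op[:k]); if category is not None: return category'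
def pvScan (op : String) : List Int → String
  | [] => "general"
  | k :: ks =>
      match pvPM.get? (PySem.Str.slice op none (some k)) with
      | some category => category
      | none => pvScan op ks

def derive_operation_category_py_alt (operation : Option String) (override : Option String) : String :=
  let ov := override.getD ""
  if ov ≠ "" then
    let candidate := PySem.Str.lower (PySem.Str.strip ov)
    if PySem.Set.contains pvValidCategories candidate then candidate
    else pvScan ((pvNormalize operation).getD "") pvLengths
  else pvScan ((pvNormalize operation).getD "") pvLengths

-- ===== PRECONDITION & SPEC =====
def Spec_derive_operation_category_py (operation : Option String) (override : Option String) (out : String) : Prop := out = derive_operation_category_py_alt operation override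
instance (operation : Option String) (override : Option String) (out : String) : Decidable (Spec_derive_operation_category_py operation override out) := by unfold Spec_derive_operation_category_py; infer_instance

-- ===== CLAIM (what is proved, stated in full; the proofs are below) =====
def Claim_equal_derive_operation_category_py : Prop := ∀ (operation : Option String) (override : Option String), Dom_derive_operation_category_py operation override → Spec_derive_operation_category_py operation override (derive_operation_category_py operation override)

-- ===== LEMMAS AND PROOFS =====

lemma pvPM_items : pvPM.items = pvTable := by decide

lemma pvPM_keys_nodup : pvPM.keys.Nodup := by decide

lemma pv_lookup_mem {s c : String} (h : pvPM.get? s = some c) : (s, c) ∈ pvTable := by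
  rw [PySem.Dict.get?, pvPM_items] at h
  rcases Option.map_eq_some_iff.mp h with ⟨pr, hfind, hsnd⟩
  have hmem := List.mem_of_find?_eq_some hfind
  have hkey := List.find?_some hfind
  have : pr = (s, c) := by
    cases pr; simp_all
  exact this ▸ hmem

lemma pv_mem_lookup {p c : String} (h : (p, c) ∈ pvTable) : pvPM.get? p = some c :=
  PySem.Dict.get?_of_mem_items pvPM (pvPM_items ▸ h) pvPM_keys_nodup

-- all seven loop lengths are nonnegative, and every table key's length occurs among them
lemma pv_lengths_nonneg : ∀ k ∈ pvLengths, 0 ≤ k := by decide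

lemma pv_table_lengths : ∀ x ∈ pvTable, (x.1.toList.length : Int) ∈ pvLengths := by decide

-- whenever one table key is a prefix of another, their categories agree
lemma pv_cat_chain : ∀ x ∈ pvTable, ∀ y ∈ pvTable, x.1.toList <+: y.1.toList → x.2 = y.2 := by decide

lemma pv_cat_unique {l : List Char} {p c q d : String} (hp : (p, c) ∈ pvTable)
    (hq : (q, d) ∈ pvTable) (hpl : p.toList <+: l) (hql : q.toList <+: l) : d = c := by
  rcases List.prefix_or_prefix_of_prefix hpl hql with h | h
  · exact (pv_cat_chain _ hp _ hq h).symm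
  · exact pv_cat_chain _ hq _ hp h

lemma pv_slice_toList (op : String) (k : Int) (hk : 0 ≤ k) :
    (PySem.Str.slice op none (some k)).toList = op.toList.take k.toNat := by
  simp only [PySem.Str.toList_slice, PySem.Chars.slice]
  exact PySem.List.slice_to _ hk

lemma pv_slice_prefix (op : String) (k : Int) (hk : 0 ≤ k) :
    (PySem.Str.slice op none (some k)).toList <+: op.toList := by
  rw [pv_slice_toList op k hk]; exact List.take_prefix _ _

lemma pv_scan_hit_aux (op p c : String) (ks : List Int) (hks : ∀ k ∈ ks, 0 ≤ k)
    (hmem : (p, c) ∈ pvTable) (hpfx : p.toList <+: op.toList)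
    (hlen : (p.toList.length : Int) ∈ ks)
    (huniq : ∀ q d, (q, d) ∈ pvTable → q.toList <+: op.toList → d = c) :
    pvScan op ks = c := by
  induction ks with
  | nil => simp at hlen
  | cons k ks ih =>
    have hk0 : 0 ≤ k := hks k List.mem_cons_self
    cases hk : pvPM.get? (PySem.Str.slice op none (some k)) with
    | some d =>
      simp only [pvScan, hk]
      exact huniq _ _ (pv_lookup_mem hk) (pv_slice_prefix op k hk0)
    | none =>
      simp only [pvScan, hk]
      have hlen' : (p.toList.length : Int) ∈ ks := by
        rcases List.mem_cons.mp hlen with he | hm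
        · -- the loop cannot miss at k = length of p: the slice there equals p
          exfalso
          have hsl : PySem.Str.slice op none (some k) = p := by
            apply String.toList_inj.mp
            rw [pv_slice_toList op k hk0, ← he]
            simpa using (List.prefix_iff_eq_take.mp hpfx).symm
          rw [hsl, pv_mem_lookup hmem] at hk
          simp at hk
        · exact hm
      exact ih (fun x hx => hks x (List.mem_cons_of_mem _ hx)) hlen'

lemma pv_scan_none_aux (op : String) (ks : List Int) (hks : ∀ k ∈ ks, 0 ≤ k)
    (h : ∀ q d, (q, d) ∈ pvTable → ¬ q.toList <+: op.toList) :
    pvScan op ks = "general" := by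
  induction ks with
  | nil => rfl
  | cons k ks ih =>
    cases hk : pvPM.get? (PySem.Str.slice op none (some k)) with
    | some d =>
      exact absurd (pv_slice_prefix op k (hks k List.mem_cons_self)) (h _ _ (pv_lookup_mem hk))
    | none =>
      simp only [pvScan, hk]
      exact ih (fun x hx => hks x (List.mem_cons_of_mem _ hx))

lemma pv_startswith_iff (op p : String) :
    PySem.Str.startswith op p = true ↔ p.toList <+: op.toList := by
  simp [PySem.Str.startswith, PySem.Chars.startswith, List.isPrefixOf_iff_prefix]

-- one positive branch of pvCategorizeA agrees with the table scan
lemma pv_branch (op : String) (group : List String) (cat : String)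
    (hgrp : ∀ q ∈ group, (q, cat) ∈ pvTable)
    (h : group.any (fun p => PySem.Str.startswith op p) = true) :
    pvScan op pvLengths = cat := by
  rcases List.any_eq_true.mp h with ⟨p, hpmem, hps⟩
  have hmem := hgrp p hpmem
  have hpfx := (pv_startswith_iff op p).mp hps
  exact pv_scan_hit_aux op p cat pvLengths pv_lengths_nonneg hmem hpfx
    (pv_table_lengths _ hmem)
    (fun q d hq hql => pv_cat_unique hmem hq hpfx hql)

lemma pv_core_eq (op : String) : pvCategorizeA op = pvScan op pvLengths := by
  unfold pvCategorizeA
  split_ifs with h1 h2 h3 h4 h5 h6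
  · exact (pv_branch op _ _ (by decide) h1).symm
  · exact (pv_branch op _ _ (by decide) h2).symm
  · exact (pv_branch op _ _ (by decide) h3).symm
  · exact (pv_branch op _ _ (by decide) h4).symm
  · exact (pv_branch op _ _ (by decide) h5).symm
  · exact (pv_branch op _ _ (by decide) h6).symm
  · refine (pv_scan_none_aux op pvLengths pv_lengths_nonneg ?_).symm
    intro q d hqd hpfx
    simp only [List.any_eq_true, not_exists] at h1 h2 h3 h4 h5 h6
    have hsw := (pv_startswith_iff op q).mpr hpfx
    fin_cases hqd <;> simp_all

-- ===== VERDICT (by name: the statement is the Claim_ definition above) =====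
theorem derive_operation_category_py_spec : Claim_equal_derive_operation_category_py := by
  intro operation override _
  unfold Spec_derive_operation_category_py derive_operation_category_py derive_operation_category_py_alt
  dsimp only
  split_ifs <;> simp [pv_core_eq]
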